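-- pv_equiv track=rewrite | github.com/lucky-rzj/BERT-ASC-KG | ASC_generating/raw/opinion_words_extracting.py | sort_auxiliary
-- ===== SOURCE A (Python) =====
-- def sort_auxiliary(text_a, text_b):
--     """
--     按 text_a 的单词顺序对 text_b 排序：
--     1. text_b 中存在于 text_a 的词 → 按 text_a 中的出现顺序排列
--     2. text_b 中不存在于 text_a 的词 → 保留原始顺序，放结果末尾
--     3. 保留 text_b 中的重复词
--     """
--     text_a_tokens = text_a.split()    #原始文本分词（基准顺序）
--     #构建词→索引映射（O(n) 复杂度，比多次 text_a.index(w) 高效）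
--     word_to_index = {word: idx for idx, word in enumerate(text_a_tokens)}
--
--     # 排序规则：
--     # - 存在于 text_a 的词 → 用其在 text_a 中的索引排序
--     # - 新增词 → 用“无穷大”作为索引（确保放末尾），同时保留原始顺序（sorted 是稳定排序）
--     sorted_text_b = sorted(
--         text_b,
--         key=lambda w: word_to_index.get(w, float('inf'))
--     )
--     return sorted_text_b
-- ===== SOURCE B (Python) =====
-- def sort_auxiliary(text_a, text_b):
--     tokens = text_a.split()
--     word_to_index = {word: idx for idx, word in enumerate(tokens)}
--     buckets = [[] for _ in tokens]   # one bucket per text_a position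
--     tail = []                        # words not in text_a, original order
--     for w in text_b:
--         i = word_to_index.get(w)
--         if i is None:
--             tail.append(w)
--         else:
--             buckets[i].append(w)
--     out = []
--     for b in buckets:
--         out += b
--     return out + tail
-- ===== Notes on version B (the rewrite author's own statement) =====
-- stated objective: alternative
-- what changed: Replaces the comparison sort with key=index-or-inf by a single-pass bucket sort: one bucket per text_a token position plus a tail list for unknown words, concatenated in order (O(n+m) vs O(m log m); measured ~1.4x, below the 1.5x bar).
import Mathlib
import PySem

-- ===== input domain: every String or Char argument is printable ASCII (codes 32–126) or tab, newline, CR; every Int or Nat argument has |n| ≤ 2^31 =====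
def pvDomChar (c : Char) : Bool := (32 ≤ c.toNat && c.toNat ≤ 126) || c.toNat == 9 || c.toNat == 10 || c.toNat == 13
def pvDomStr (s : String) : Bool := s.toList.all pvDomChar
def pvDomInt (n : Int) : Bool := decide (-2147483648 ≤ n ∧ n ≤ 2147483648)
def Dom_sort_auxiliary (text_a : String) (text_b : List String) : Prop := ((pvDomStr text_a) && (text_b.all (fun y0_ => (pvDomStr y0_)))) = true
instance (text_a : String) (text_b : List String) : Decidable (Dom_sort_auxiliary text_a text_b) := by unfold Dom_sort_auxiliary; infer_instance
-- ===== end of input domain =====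

-- B replaces A's comparison sort (key = index in text_a, or inf for unknown words) by a
-- single-pass bucket sort: one bucket per text_a token, a tail list for unknown words
-- (a different algorithm; not measured as faster).


-- ===== PORT A =====
-- float('inf') is modelled by (text_a_tokens.length : Int): every index the dict stores is
-- < text_a_tokens.length, so every comparison the sort makes agrees with Python's int-vs-inf ones.
def sort_auxiliary (text_a : String) (text_b : List String) : List String :=
  let text_a_tokens := PySem.Str.split₀ text_a
  let word_to_index : PySem.Dict String Int :=
    (PySem.List.enumerate text_a_tokens).foldl (fun d p => d.insert p.2 p.1) PySem.Dict.empty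
  PySem.List.sorted text_b (fun w => word_to_index.getD w (text_a_tokens.length : Int)) false

-- ===== PORT B =====
def sort_auxiliary_alt (text_a : String) (text_b : List String) : List String :=
  let tokens := PySem.Str.split₀ text_a
  let word_to_index : PySem.Dict String Int :=
    (PySem.List.enumerate tokens).foldl (fun d p => d.insert p.2 p.1) PySem.Dict.empty
  let st := text_b.foldl
    (fun (st : List (List String) × List String) w =>
      match word_to_index.get? w with
      | none => (st.1, st.2 ++ [w])
      | some i => (st.1.set i.toNat ((st.1.getD i.toNat []) ++ [w]), st.2))
    (tokens.map (fun _ => []), [])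
  (st.1.foldl (fun acc b => acc ++ b) []) ++ st.2

-- ===== PRECONDITION & SPEC =====
def Spec_sort_auxiliary (text_a : String) (text_b : List String) (out : List String) : Prop := out = sort_auxiliary_alt text_a text_b
instance (text_a : String) (text_b : List String) (out : List String) : Decidable (Spec_sort_auxiliary text_a text_b out) := by unfold Spec_sort_auxiliary; infer_instance

-- ===== CLAIM (what is proved, stated in full; the proofs are below) =====
def Claim_equal_sort_auxiliary : Prop := ∀ (text_a : String) (text_b : List String), Dom_sort_auxiliary text_a text_b → Spec_sort_auxiliary text_a text_b (sort_auxiliary text_a text_b)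

-- ===== LEMMAS AND PROOFS =====

-- insertBy passes over a block of elements it does not go before
theorem insertBy_append_left {α : Type} (before : α → α → Bool) (x : α) (l1 l2 : List α)
    (h : ∀ y ∈ l1, before x y = false) :
    PySem.List.insertBy before x (l1 ++ l2) = l1 ++ PySem.List.insertBy before x l2 := by
  induction l1 with
  | nil => rfl
  | cons y ys ih =>
    simp only [List.cons_append, PySem.List.insertBy, h y (by simp)]
    simp only [Bool.false_eq_true, if_false]
    have := ih (fun z hz => h z (by simp [hz]))
    simp [this]

-- insertBy goes to the very front when it goes before every element
theorem insertBy_all_before {α : Type} (before : α → α → Bool) (x : α) (l : List α)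
    (h : ∀ y ∈ l, before x y = true) :
    PySem.List.insertBy before x l = x :: l := by
  cases l with
  | nil => rfl
  | cons y ys => simp [PySem.List.insertBy, h y (by simp)]

-- inserting x into a strictly-key-increasing concatenation of key-homogeneous blocks
theorem ins_block {α : Type} (key : α → Int) (x : α) (vs : List Int) (F : Int → List α)
    (hs : vs.Pairwise (· < ·)) (hmem : key x ∈ vs)
    (hF : ∀ v, ∀ y ∈ F v, key y = v) :
    PySem.List.insertBy (fun a b => decide (key a < key b)) x (vs.flatMap F) =
      vs.flatMap (fun v => F v ++ if key x = v then [x] else []) := by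
  induction vs with
  | nil => simp at hmem
  | cons v vs' ih =>
    have hs' := (List.pairwise_cons.mp hs).2
    have hlt := (List.pairwise_cons.mp hs).1
    by_cases hx : key x = v
    · -- insert at the end of block v
      have h1 : ∀ y ∈ F v, (fun a b => decide (key a < key b)) x y = false := by
        intro y hy
        simp [hF v y hy, hx]
      rw [List.flatMap_cons, insertBy_append_left _ _ _ _ h1]
      have h2 : ∀ y ∈ vs'.flatMap F, (fun a b => decide (key a < key b)) x y = true := by
        intro y hy
        rcases List.mem_flatMap.mp hy with ⟨v', hv', hyv'⟩
        have := hF v' y hyv'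
        simp [this, hx]
        exact hlt v' hv'
      rw [insertBy_all_before _ _ _ h2]
      have h3 : vs'.flatMap (fun v' => F v' ++ if key x = v' then [x] else []) = vs'.flatMap F := by
        apply List.flatMap_congr  -- may not exist; fallback below
        intro v' hv'
        have : key x ≠ v' := by have := hlt v' hv'; omega
        simp [this]
      rw [hx] at h3
      simp [hx, h3]
  -- case key x ≠ v
    · have hmem' : key x ∈ vs' := by
        rcases List.mem_cons.mp hmem with h | h
        · exact absurd h hx
        · exact h
      have h1 : ∀ y ∈ F v, (fun a b => decide (key a < key b)) x y = false := by
        intro y hy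
        have hkv := hF v y hy
        have : v < key x := hlt _ hmem'
        simp [hkv]; omega
      rw [List.flatMap_cons, insertBy_append_left _ _ _ _ h1, ih hs' hmem']
      simp [hx]

-- stable sort = concatenation of the per-key filters, keys taken in increasing order
theorem sorted_flatMap_filter {α : Type} (key : α → Int) (xs : List α) (vs : List Int)
    (hs : vs.Pairwise (· < ·)) (hcov : ∀ x ∈ xs, key x ∈ vs) :
    PySem.List.sorted xs key false =
      vs.flatMap (fun v => xs.filter (fun x => decide (key x = v))) := by
  rw [PySem.List.sorted_eq_foldl_insertBy]
  induction xs using List.reverseRecOn with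
  | nil => simp
  | append_singleton ys x ih =>
    rw [List.foldl_append, List.foldl_cons, List.foldl_nil]
    rw [ih (fun z hz => hcov z (by simp [hz]))]
    rw [ins_block key x vs _ hs (hcov x (by simp))
      (fun v y hy => by simpa using (List.mem_filter.mp hy).2)]
    apply List.flatMap_congr
    intro v hv
    by_cases hxv : key x = v <;> simp [List.filter_append, hxv]

theorem dict_fold_vals {P : Int → Prop} (l : List (Int × String)) (d : PySem.Dict String Int)
    (hd : ∀ w v, d.get? w = some v → P v) (hl : ∀ p ∈ l, P p.1) :
    ∀ w v, (l.foldl (fun d p => d.insert p.2 p.1) d).get? w = some v → P v := by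
  induction l generalizing d with
  | nil => exact hd
  | cons p l' ih =>
    intro w v h
    refine ih (d.insert p.2 p.1) ?_ (fun q hq => hl q (by simp [hq])) w v h
    intro w' v' h'
    rw [PySem.Dict.get?_insert] at h'
    split at h'
    · cases h'; exact hl p (by simp)
    · exact hd w' v' h'

theorem set_map_range {α : Type} (n k : Nat) (_hk : k < n) (g : Nat → α) (v : α) :
    ((List.range n).map g).set k v = (List.range n).map (fun j => if j = k then v else g j) := by
  apply List.ext_getElem
  · simp
  · intro j h1 h2
    simp only [List.getElem_set, List.getElem_map, List.getElem_range]
    by_cases hj : k = j <;> simp [hj]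
    omega

theorem getD_map_range' {α : Type} (n k : Nat) (hk : k < n) (g : Nat → α) (dflt : α) :
    ((List.range n).map g).getD k dflt = g k := by
  rw [List.getD_eq_getElem?_getD]
  simp [hk]

theorem bfold (d : PySem.Dict String Int) (n : Nat)
    (hv : ∀ w v, d.get? w = some v → 0 ≤ v ∧ v < (n : Int)) (p q : List String) :
    p.foldl
      (fun (st : List (List String) × List String) w =>
        match d.get? w with
        | none => (st.1, st.2 ++ [w])
        | some i => (st.1.set i.toNat ((st.1.getD i.toNat []) ++ [w]), st.2))
      ((List.range n).map (fun (j : Nat) => q.filter (fun w => d.get? w == some (j : Int))),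
        q.filter (fun w => (d.get? w).isNone))
    = ((List.range n).map (fun (j : Nat) => (q ++ p).filter (fun w => d.get? w == some (j : Int))),
        (q ++ p).filter (fun w => (d.get? w).isNone)) := by
  induction p generalizing q with
  | nil => simp
  | cons w p' ih =>
    rw [List.foldl_cons]
    cases h : d.get? w with
    | none =>
      have e1 : (List.range n).map (fun (j : Nat) => q.filter (fun w' => d.get? w' == some (j : Int)))
          = (List.range n).map (fun (j : Nat) => (q ++ [w]).filter (fun w' => d.get? w' == some (j : Int))) := by
        apply List.map_congr_left
        intro j _
        simp [List.filter_append, h]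
      have e2 : q.filter (fun w' => (d.get? w').isNone) ++ [w]
          = (q ++ [w]).filter (fun w' => (d.get? w').isNone) := by
        simp [List.filter_append, h]
      rw [e1, e2, ih (q ++ [w])]
      simp only [List.append_assoc, List.singleton_append]
    | some i =>
      have hvi := hv w i h
      have hitn : i.toNat < n := by omega
      have hicast : ((i.toNat : Nat) : Int) = i := Int.toNat_of_nonneg hvi.1
      dsimp only
      rw [getD_map_range' n i.toNat hitn _ [],
        set_map_range n i.toNat hitn _ _]
      have e1 : (List.range n).map
            (fun (j : Nat) => if j = i.toNat then q.filter (fun w' => d.get? w' == some ((i.toNat : Nat) : Int)) ++ [w]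
              else q.filter (fun w' => d.get? w' == some (j : Int)))
          = (List.range n).map (fun (j : Nat) => (q ++ [w]).filter (fun w' => d.get? w' == some (j : Int))) := by
        apply List.map_congr_left
        intro j _
        by_cases hj : j = i.toNat
        · subst hj
          simp [List.filter_append, h, hicast]
        · have hne : ¬ (i = (j : Int)) := by omega
          simp [List.filter_append, h, hne, hj]
      have e2 : q.filter (fun w' => (d.get? w').isNone)
          = (q ++ [w]).filter (fun w' => (d.get? w').isNone) := by
        simp [List.filter_append, h]
      rw [e1, e2, ih (q ++ [w])]
      simp

theorem key_beq (o : Option Int) (n j : Int) (hne : n ≠ j) :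
    decide (o.getD n = j) = (o == some j) := by
  cases o with
  | none => simp [hne]
  | some v => simpa using (Bool.beq_eq_decide_eq v j).symm

theorem key_isNone (o : Option Int) (n : Int) (hb : ∀ v, o = some v → v ≠ n) :
    decide (o.getD n = n) = o.isNone := by
  cases o with
  | none => simp
  | some v => simp [hb v rfl]

theorem ports_agree (text_a : String) (text_b : List String) :
    sort_auxiliary text_a text_b = sort_auxiliary_alt text_a text_b := by
  simp only [sort_auxiliary, sort_auxiliary_alt]
  set tokens := PySem.Str.split₀ text_a with htok
  set d := (PySem.List.enumerate tokens).foldl (fun d p => d.insert p.2 p.1) PySem.Dict.empty with hd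
  set n := tokens.length with hn
  have hv : ∀ w v, d.get? w = some v → 0 ≤ v ∧ v < (n : Int) := by
    apply dict_fold_vals (P := fun v => 0 ≤ v ∧ v < (n : Int))
    · intro w' v' h'
      simp [PySem.Dict.get?_empty] at h'
    · intro p hp
      rcases (PySem.List.mem_enumerate_iff _ _ _).mp hp with ⟨k, hk, rfl⟩
      exact ⟨by simp, by simp; omega⟩
  have hs : ((List.range (n+1)).map (fun (j : Nat) => (j : Int))).Pairwise (· < ·) := by
    refine List.Pairwise.map _ ?_ List.pairwise_lt_range
    intro a b hab
    exact_mod_cast hab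
  have hcov : ∀ x ∈ text_b, (fun w => d.getD w (n : Int)) x ∈ (List.range (n+1)).map (fun (j : Nat) => (j : Int)) := by
    intro x _
    simp only [PySem.Dict.getD_eq_get?_getD, List.mem_map, List.mem_range]
    cases hgx : d.get? x with
    | none => exact ⟨n, by omega, rfl⟩
    | some v =>
      have hb := hv x v hgx
      exact ⟨v.toNat, by omega, by simp [Int.toNat_of_nonneg hb.1]⟩
  rw [sorted_flatMap_filter (fun w => d.getD w (n : Int)) text_b
    ((List.range (n+1)).map (fun (j : Nat) => (j : Int))) hs hcov]
  rw [List.flatMap_map, List.range_succ, List.flatMap_append]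
  -- B side: initial buckets are the q = [] filters
  have hinit : (tokens.map (fun _ => ([] : List String)),([] : List String)) =
      ((List.range n).map (fun (j : Nat) => ([] : List String).filter (fun w => d.get? w == some (j : Int))),
        ([] : List String).filter (fun w => (d.get? w).isNone)) := by
    simp [List.map_const', hn]
  rw [hinit, bfold d n hv text_b [], List.nil_append]
  rw [PySem.List.foldl_append_eq_flatten, List.nil_append]
  have hflat : ((List.range n).map (fun (j : Nat) => text_b.filter (fun w => d.get? w == some (j : Int)))).flatten
      = (List.range n).flatMap (fun (j : Nat) => text_b.filter (fun w => d.get? w == some (j : Int))) := by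
    simp [List.flatMap_def]
  rw [hflat]
  congr 1
  · apply List.flatMap_congr
    intro j hj
    have hjn : j < n := List.mem_range.mp hj
    apply List.filter_congr
    intro x _
    simp only [PySem.Dict.getD_eq_get?_getD]
    exact key_beq _ _ _ (by omega)
  · simp only [List.flatMap_cons, List.flatMap_nil, List.append_nil]
    apply List.filter_congr
    intro x _
    simp only [PySem.Dict.getD_eq_get?_getD]
    refine key_isNone _ _ ?_
    intro v hgx
    have hb := hv x v hgx
    omega

-- ===== VERDICT (by name: the statement is the Claim_ definition above) =====
theorem sort_auxiliary_spec : Claim_equal_sort_auxiliary := by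
  intro text_a text_b _
  unfold Spec_sort_auxiliary
  exact ports_agree text_a text_b
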